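-- pv_equiv track=rewrite | github.com/futurepaycc/automata_practise1 | regexp/naive_test/regexp2.py | expr3
-- ===== SOURCE A (Python) =====
-- from typing import List
--
-- LANG_LETTER = ['a','b','c']
--
-- RE_LETTER = ['+','*','|']
--
-- def expr3(pattern):
--     letters:List = list(pattern)
--
--     res_patten_l:List = []
--
--     cur_re_letter = None
--     cur_lang_letter = None
--     for letter in reversed(letters) : # 用栈的思路, 先处理结尾
--
--         if letter in RE_LETTER:
--             if letter != '|':
--                 cur_re_letter = letter
--             continue
--         elif letter in LANG_LETTER:
--             cur_lang_letter = letter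
--         else:
--             raise Exception("不认识的字母")
--
--         if cur_lang_letter:
--             if cur_re_letter:
--                 res_patten_l.append( (cur_lang_letter,cur_re_letter) )
--             else:
--                 res_patten_l.append( (cur_lang_letter,None) )
--     return list( reversed(res_patten_l) )
-- ===== SOURCE B (Python) =====
-- LANG_LETTER = ['a','b','c']
--
-- RE_LETTER = ['+','*','|']
--
-- def expr3(pattern):
--     # forward pass: buffer letters, flush them when a modifier is reached
--     res = []
--     buf = []
--     for ch in pattern:
--         if ch in LANG_LETTER:
--             buf.append(ch)
--         elif ch in ('+', '*'):
--             res.extend((l, ch) for l in buf)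
--             buf = []
--         elif ch == '|':
--             pass
--         else:
--             raise Exception("不认识的字母")
--     res.extend((l, None) for l in buf)
--     return res
-- ===== Notes on version B (the rewrite author's own statement) =====
-- stated objective: alternative
-- what changed: Replaces A's reversed scan with a sticky cur_re_letter state by a single forward pass that buffers language letters and flushes the buffer with the modifier when '+'/'*' is reached, flushing leftovers with None at the end.
import Mathlib
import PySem

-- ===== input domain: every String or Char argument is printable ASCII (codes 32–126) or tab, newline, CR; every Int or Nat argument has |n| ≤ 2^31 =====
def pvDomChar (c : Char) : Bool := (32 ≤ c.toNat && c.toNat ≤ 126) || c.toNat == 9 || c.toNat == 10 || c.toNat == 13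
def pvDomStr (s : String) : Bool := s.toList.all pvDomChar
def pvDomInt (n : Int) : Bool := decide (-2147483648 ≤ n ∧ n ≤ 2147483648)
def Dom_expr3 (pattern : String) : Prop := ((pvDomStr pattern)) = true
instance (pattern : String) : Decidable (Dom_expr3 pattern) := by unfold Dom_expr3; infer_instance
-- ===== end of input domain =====

-- B replaces A's reversed scan with sticky modifier state by a forward pass that
-- buffers letters and flushes the buffer on each modifier (objective: alternative).

-- ===== PORT A =====
-- state = (cur_re_letter, cur_lang_letter, res_patten_l)
def expr3Astep (st : Option String × Option String × List (String × Option String))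
    (letter : Char) : Option String × Option String × List (String × Option String) :=
  let (curRe, curLang, res) := st
  if letter ∈ ['+', '*', '|'] then
    if letter ≠ '|' then (some (String.ofList [letter]), curLang, res) else st
  else if letter ∈ ['a', 'b', 'c'] then
    let curLang' := some (String.ofList [letter])
    match curLang' with                     -- `if cur_lang_letter:` (always truthy here)
    | some l =>
      match curRe with
      | some r => (curRe, curLang', res ++ [(l, some r)])
      | none   => (curRe, curLang', res ++ [(l, none)])
    | none => (curRe, curLang', res)
  else st                                   -- Python raises Exception here; excluded by Pre_expr3

def expr3 (pattern : String) : List (String × Option String) :=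
  let letters := pattern.toList
  let st := letters.reverse.foldl expr3Astep (none, none, [])
  st.2.2.reverse

-- ===== PORT B =====
-- state = (buf, res)
def expr3Bstep (st : List String × List (String × Option String)) (ch : Char) :
    List String × List (String × Option String) :=
  let (buf, res) := st
  if ch ∈ ['a', 'b', 'c'] then (buf ++ [String.ofList [ch]], res)
  else if ch = '+' ∨ ch = '*' then ([], res ++ buf.map (fun l => (l, some (String.ofList [ch]))))
  else if ch = '|' then st
  else st                                   -- Python raises Exception here; excluded by Pre_expr3

def expr3_alt (pattern : String) : List (String × Option String) :=
  let st := pattern.toList.foldl expr3Bstep ([], [])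
  st.2 ++ st.1.map (fun l => (l, none))

-- ===== PRECONDITION & SPEC =====
-- Pre_ excludes exactly the inputs containing a character outside 'abc+*|',
-- on which Python A (and B) raise Exception("不认识的字母").
def Pre_expr3 (pattern : String) : Prop :=
  pattern.toList.all (fun c => c ∈ ['a', 'b', 'c', '+', '*', '|']) = true
instance (pattern : String) : Decidable (Pre_expr3 pattern) := by unfold Pre_expr3; infer_instance
def pvWitness_expr3 : String := "ab*c|a+"

def Spec_expr3 (pattern : String) (out : List (String × Option String)) : Prop := out = expr3_alt pattern
instance (pattern : String) (out : List (String × Option String)) : Decidable (Spec_expr3 pattern out) := by unfold Spec_expr3; infer_instance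

-- ===== CLAIM (what is proved, stated in full; the proofs are below) =====
def Claim_equal_expr3 : Prop := ∀ (pattern : String), Dom_expr3 pattern → Pre_expr3 pattern → Spec_expr3 pattern (expr3 pattern)

-- ===== LEMMAS AND PROOFS =====

-- modifier that A's reversed scan has in `cur_re_letter` after processing `xs`
def pvLmod (xs : List Char) (r : Option String) : Option String :=
  match xs with
  | [] => r
  | c :: t => pvLmod t (if c = '+' ∨ c = '*' then some (String.ofList [c]) else r)

-- the pairs A's reversed scan emits over `xs` with incoming sticky modifier `r`
def pvG (xs : List Char) (r : Option String) : List (String × Option String) :=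
  match xs with
  | [] => []
  | c :: t =>
    if c ∈ ['+', '*', '|'] then
      (if c ≠ '|' then pvG t (some (String.ofList [c])) else pvG t r)
    else if c ∈ ['a', 'b', 'c'] then (String.ofList [c], r) :: pvG t r
    else pvG t r

-- first modifier of `t` (the one B's flush attaches to letters buffered before it)
def pvFm (t : List Char) : Option String :=
  match t with
  | [] => none
  | c :: t' => if c = '+' ∨ c = '*' then some (String.ofList [c]) else pvFm t'

-- forward characterization: each language letter paired with the first modifier to its right
def pvH (t : List Char) : List (String × Option String) :=
  match t with
  | [] => []
  | c :: t' => if c ∈ ['a', 'b', 'c'] then (String.ofList [c], pvFm t') :: pvH t' else pvH t'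

theorem pvA_char (xs : List Char) : ∀ (r lg : Option String) (acc : List (String × Option String)),
    (xs.foldl expr3Astep (r, lg, acc)).2.2 = acc ++ pvG xs r := by
  induction xs with
  | nil => intro r lg acc; simp [pvG]
  | cons c t ih =>
    intro r lg acc
    by_cases h1 : c ∈ ['+', '*', '|']
    · by_cases h2 : c = '|'
      · simp [List.foldl_cons, expr3Astep, h2, pvG, ih]
      · simp [List.foldl_cons, expr3Astep, h1, h2, pvG, ih]
    · by_cases h3 : c ∈ ['a', 'b', 'c']
      · cases r with
        | some rr => simp [List.foldl_cons, expr3Astep, h1, h3, pvG, ih]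
        | none => simp [List.foldl_cons, expr3Astep, h1, h3, pvG, ih]
      -- (membership facts below are decided by simp after substituting c)
      · simp [List.foldl_cons, expr3Astep, h1, h3, pvG, ih]

theorem pvB_char (xs : List Char) : ∀ (buf : List String) (res : List (String × Option String)),
    (xs.foldl expr3Bstep (buf, res)).2 ++ (xs.foldl expr3Bstep (buf, res)).1.map (fun l => (l, none))
      = res ++ buf.map (fun l => (l, pvFm xs)) ++ pvH xs := by
  induction xs with
  | nil => intro buf res; simp [pvFm, pvH]
  | cons c t ih =>
    intro buf res
    by_cases h3 : c ∈ ['a', 'b', 'c']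
    · have hm : ¬ (c = '+' ∨ c = '*') := by
        rintro (rfl | rfl) <;> simp at h3
      simp only [List.foldl_cons, expr3Bstep, if_pos h3]
      rw [ih]
      simp [pvFm, pvH, hm, h3]
    · by_cases h2 : c = '+' ∨ c = '*'
      · simp only [List.foldl_cons, expr3Bstep, if_neg h3, if_pos h2]
        rw [ih]
        simp [pvFm, pvH, h2, h3]
      · by_cases h4 : c = '|'
        · simp only [List.foldl_cons, expr3Bstep, if_neg h3, if_neg h2, if_pos h4]
          rw [ih]; simp [pvFm, pvH, h2, h3]
        · simp only [List.foldl_cons, expr3Bstep, if_neg h3, if_neg h2, if_neg h4]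
          rw [ih]; simp [pvFm, pvH, h2, h3]

theorem pvLmod_append (xs ys : List Char) : ∀ r, pvLmod (xs ++ ys) r = pvLmod ys (pvLmod xs r) := by
  induction xs with
  | nil => intro r; simp [pvLmod]
  | cons c t ih => intro r; simp [pvLmod, ih]

theorem pvLmod_rev (t : List Char) : ∀ r, pvLmod t.reverse r = (pvFm t).or r := by
  induction t with
  | nil => intro r; simp [pvLmod, pvFm]
  | cons c t ih =>
    intro r
    rw [List.reverse_cons, pvLmod_append, ih]
    by_cases h : c = '+' ∨ c = '*' <;> simp [pvLmod, pvFm, h]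

theorem pvG_append (xs ys : List Char) : ∀ r,
    pvG (xs ++ ys) r = pvG xs r ++ pvG ys (pvLmod xs r) := by
  induction xs with
  | nil => intro r; simp [pvG, pvLmod]
  | cons c t ih =>
    intro r
    by_cases h1 : c ∈ ['+', '*', '|']
    · by_cases h2 : c = '|'
      · have hm : ¬ (c = '+' ∨ c = '*') := by subst h2; simp
        simp [pvG, pvLmod, h2, ih]
      · have hm : c = '+' ∨ c = '*' := by
          simp only [List.mem_cons, List.not_mem_nil, or_false] at h1
          rcases h1 with rfl | rfl | rfl <;> simp_all
        simp [pvG, pvLmod, h2, hm, ih]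
    · have hm : ¬ (c = '+' ∨ c = '*') := by
        rintro (rfl | rfl) <;> simp at h1
      by_cases h3 : c ∈ ['a', 'b', 'c'] <;> simp [pvG, pvLmod, h1, h3, hm, ih]

theorem pvG_rev (t : List Char) : ∀ r, (pvG t.reverse r).reverse =
    (match t with
     | [] => []
     | c :: t' => if c ∈ ['a', 'b', 'c'] then (String.ofList [c], (pvFm t').or r) :: (pvG t'.reverse r).reverse
                  else (pvG t'.reverse r).reverse) := by
  intro r
  cases t with
  | nil => simp [pvG]
  | cons c t' =>
    rw [List.reverse_cons, pvG_append, pvLmod_rev]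
    by_cases h1 : c ∈ ['+', '*', '|']
    · by_cases h2 : c = '|'
      · have h3 : ¬ c ∈ ['a', 'b', 'c'] := by subst h2; simp
        simp [pvG, h2]
      · have hm : c = '+' ∨ c = '*' := by
          simp only [List.mem_cons, List.not_mem_nil, or_false] at h1
          rcases h1 with rfl | rfl | rfl <;> simp_all
        have h3 : ¬ c ∈ ['a', 'b', 'c'] := by
          rcases hm with rfl | rfl <;> simp
        simp [pvG, h2, hm, h3]
    · by_cases h3 : c ∈ ['a', 'b', 'c'] <;> simp [pvG, h1, h3]

theorem pvG_rev_none (t : List Char) : (pvG t.reverse none).reverse = pvH t := by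
  induction t with
  | nil => simp [pvG, pvH]
  | cons c t' ih =>
    rw [pvG_rev]
    by_cases h3 : c ∈ ['a', 'b', 'c'] <;> simp [pvH, h3, ih, Option.or_none]

-- ===== VERDICT (by name: the statement is the Claim_ definition above) =====
theorem expr3_spec : Claim_equal_expr3 := by
  intro pattern _ _
  show (List.foldl expr3Astep (none, none, []) pattern.toList.reverse).2.2.reverse
      = (List.foldl expr3Bstep (([], []) : List String × List (String × Option String)) pattern.toList).2
        ++ (List.foldl expr3Bstep (([], []) : List String × List (String × Option String)) pattern.toList).1.map (fun l => (l, none))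
  rw [pvA_char, pvB_char]
  simp [pvG_rev_none]
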